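-- pv_equiv track=rewrite | github.com/AnettaKo/pythonProjectGit | home_assignment02_Kozhukhova.py | multiplyNM
-- ===== SOURCE A (Python) =====
-- def multiplyNM(n, m):
--
--     #первый вариант
--     Sum = 1
--     i = n
--     while i <= m:
--         Sum = Sum * i
--         i += 1
--     #return Sum
--
--     #второй вариант
--     Sum = 1
--     for i in range(n,m+1):
--         Sum = Sum * i
--     return Sum
-- ===== SOURCE B (Python) =====
-- def multiplyNM(n, m):
--     # balanced divide-and-conquer range product: split at the midpoint, multiply halves
--     def prod(a, b):
--         if b < a:
--             return 1
--         if a == b: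
--             return a
--         mid = (a + b) // 2
--         return prod(a, mid) * prod(mid + 1, b)
--     return prod(n, m)
-- ===== Notes on version B (the rewrite author's own statement) =====
-- stated objective: alternative
-- what changed: Replaces the left-to-right loop multiplying one factor at a time by a balanced divide-and-conquer range product that recursively splits [n,m] at the midpoint and multiplies the two half-products.
import Mathlib
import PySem

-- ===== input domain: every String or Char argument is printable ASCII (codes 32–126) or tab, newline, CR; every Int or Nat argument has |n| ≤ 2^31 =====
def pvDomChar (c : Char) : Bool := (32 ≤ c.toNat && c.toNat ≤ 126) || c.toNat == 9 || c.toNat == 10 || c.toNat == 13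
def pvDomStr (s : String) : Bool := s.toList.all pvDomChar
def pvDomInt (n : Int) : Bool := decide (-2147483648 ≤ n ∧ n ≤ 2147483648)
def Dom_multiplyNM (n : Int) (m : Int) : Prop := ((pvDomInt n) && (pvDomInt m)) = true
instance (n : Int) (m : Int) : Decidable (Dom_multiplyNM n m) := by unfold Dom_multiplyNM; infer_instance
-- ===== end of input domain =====

-- B replaces A's sequential factor-by-factor loop by a balanced divide-and-conquer
-- range product (objective: alternative algorithm, same exact value).

-- ===== PORT A =====
-- first variant in A: while i <= m: Sum = Sum * i; i += 1  (its result is discarded by A)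
def pvWhileA (m : Int) (i : Int) (Sum : Int) : Int :=
  if i ≤ m then pvWhileA m (i + 1) (Sum * i) else Sum
termination_by (m + 1 - i).toNat
decreasing_by omega

def multiplyNM (n : Int) (m : Int) : Int :=
  let _Sum1 := pvWhileA m n 1          -- A computes this and throws it away
  (PySem.List.pyRange n (m + 1) 1).foldl (fun Sum i => Sum * i) 1

-- ===== PORT B =====
-- prod(a, b): balanced recursive split of the range product
def pvProdDC (a : Int) (b : Int) : Int :=
  if b < a then 1
  else if a = b then a
  else
    let mid := PySem.Int.floordiv (a + b) 2
    pvProdDC a mid * pvProdDC (mid + 1) b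
termination_by (b + 1 - a).toNat
decreasing_by
  all_goals
    simp only [PySem.Int.floordiv] at *
    have hfd : (a + b).fdiv 2 = (a + b) / 2 := by rw [Int.fdiv_eq_ediv]; simp
    omega

def multiplyNM_alt (n : Int) (m : Int) : Int := pvProdDC n m

-- ===== PRECONDITION & SPEC =====
def Spec_multiplyNM (n : Int) (m : Int) (out : Int) : Prop := out = multiplyNM_alt n m
instance (n : Int) (m : Int) (out : Int) : Decidable (Spec_multiplyNM n m out) := by unfold Spec_multiplyNM; infer_instance

-- ===== CLAIM (what is proved, stated in full; the proofs are below) =====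
def Claim_equal_multiplyNM : Prop := ∀ (n : Int) (m : Int), Dom_multiplyNM n m → Spec_multiplyNM n m (multiplyNM n m)

-- ===== LEMMAS AND PROOFS =====

theorem foldl_mul_shift (l : List Int) (c : Int) :
    l.foldl (fun Sum i => Sum * i) c = c * l.foldl (fun Sum i => Sum * i) 1 := by
  induction l generalizing c with
  | nil => simp
  | cons x xs ih =>
    simp only [List.foldl_cons]
    rw [ih (c * x), ih (1 * x)]
    ring

theorem pvProdDC_eq_foldl (a b : Int) :
    pvProdDC a b = (PySem.List.pyRange a (b + 1) 1).foldl (fun Sum i => Sum * i) 1 := by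
  rw [pvProdDC]
  split
  · rw [PySem.List.pyRange_one_eq_nil (by omega)]; rfl
  · split
    · next h1 h2 =>
      subst h2
      rw [PySem.List.pyRange_one_singleton]
      simp
    · next h1 h2 =>
      have hfd : (a + b).fdiv 2 = (a + b) / 2 := by rw [Int.fdiv_eq_ediv]; simp
      set mid := PySem.Int.floordiv (a + b) 2 with hmid
      have hmid' : mid = (a + b).fdiv 2 := rfl
      have hb1 : a ≤ mid := by omega
      have hb2 : mid < b := by omega
      show pvProdDC a mid * pvProdDC (mid + 1) b
          = (PySem.List.pyRange a (b + 1) 1).foldl (fun Sum i => Sum * i) 1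
      rw [pvProdDC_eq_foldl a mid, pvProdDC_eq_foldl (mid + 1) b]
      rw [PySem.List.pyRange_one_append a (mid + 1) (b + 1) (by omega) (by omega)]
      rw [List.foldl_append,
        foldl_mul_shift (PySem.List.pyRange (mid + 1) (b + 1) 1)
          ((PySem.List.pyRange a (mid + 1) 1).foldl (fun Sum i => Sum * i) 1)]
termination_by (b + 1 - a).toNat
decreasing_by
  all_goals
    simp only [PySem.Int.floordiv] at *
    have hfd : (a + b).fdiv 2 = (a + b) / 2 := by rw [Int.fdiv_eq_ediv]; simp
    omega

-- ===== VERDICT (by name: the statement is the Claim_ definition above) =====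
theorem multiplyNM_spec : Claim_equal_multiplyNM := by
  intro n m _
  unfold Spec_multiplyNM multiplyNM multiplyNM_alt
  rw [pvProdDC_eq_foldl]
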